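-- pv_equiv track=rewrite | github.com/zh3nl/Interesting-Problems | CodeSignal/Python/Array Iteration from Middle to Ends/Alternating Traverse from Middle to Ends/solution.py | unusual_traversal
-- ===== SOURCE A (Python) =====
-- def unusual_traversal(array):
--     # TODO: implement this function
--     mid = len(array) // 2
--     left = mid - 1
--     right = mid + 1
--     result = [array[mid]]
--     take_left = True
--
--     while left >= 0 or right < len(array):
--         if take_left:
--             count = min(2, left + 1)
--             for i in range(left - count + 1, left + 1):
--                 result.append(array[i])
--             left -= count
--         else:
--             count = min(2, len(array) - right)
--             for i in range(right, right + count):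
--                 result.append(array[i])
--             right += count
--
--         take_left = not take_left
--
--     return result
-- ===== SOURCE B (Python) =====
-- # B: build [array[mid]] then interleave two precomputed <=2-size chunk lists (left side
-- # chunked from the middle outward with each chunk in ascending order, right side
-- # chunked left-to-right), flushing whichever list is longer at the end.
-- def unusual_traversal(array):
--     mid = len(array) // 2
--     rev = array[:mid][::-1]
--     left_chunks = [rev[k:k + 2][::-1] for k in range(0, len(rev), 2)]
--     rest = array[mid + 1:]
--     right_chunks = [rest[k:k + 2] for k in range(0, len(rest), 2)]
--     out = [array[mid]]
--     for lc, rc in zip(left_chunks, right_chunks):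
--         out += lc + rc
--     k = min(len(left_chunks), len(right_chunks))
--     for c in left_chunks[k:] + right_chunks[k:]:
--         out += c
--     return out
-- ===== Notes on version B (the rewrite author's own statement) =====
-- stated objective: alternative
-- what changed: Instead of A's while loop walking two cursors with an alternation flag, B precomputes the two chunk lists (left half chunked in pairs from the middle outward, right half chunked left-to-right) and interleaves them after the middle element.
import Mathlib
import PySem

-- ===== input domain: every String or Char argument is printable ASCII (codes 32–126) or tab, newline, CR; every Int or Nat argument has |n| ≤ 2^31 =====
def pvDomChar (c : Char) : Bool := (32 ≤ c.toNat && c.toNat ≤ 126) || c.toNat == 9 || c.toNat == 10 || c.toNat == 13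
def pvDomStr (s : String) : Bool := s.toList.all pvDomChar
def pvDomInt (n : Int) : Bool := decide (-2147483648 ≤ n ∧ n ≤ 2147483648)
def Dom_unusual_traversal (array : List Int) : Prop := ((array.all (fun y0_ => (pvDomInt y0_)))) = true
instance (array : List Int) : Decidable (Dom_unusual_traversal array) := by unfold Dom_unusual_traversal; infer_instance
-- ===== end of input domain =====

-- B builds [array[mid]] then interleaves two precomputed ≤2-size chunk lists instead of
-- walking two cursors with an alternation flag (objective: alternative decomposition).

-- ===== PORT A =====
-- the while loop of A; `count` (= min 2 …) is inlined at its two uses.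
-- `fuel` only makes the recursion structural; unusual_traversal passes enough of it
-- (2*len+2), and utLoop_eq below proves the loop never exhausts it.
def utLoop (array : List Int) : Nat → Int → Int → Bool → List Int → List Int
  | 0, _, _, _, result => result
  | fuel + 1, left, right, takeLeft, result =>
    if 0 ≤ left ∨ right < (array.length : Int) then
      if takeLeft then
        utLoop array fuel (left - min 2 (left + 1)) right false
          (result ++ (PySem.List.pyRange (left - min 2 (left + 1) + 1) (left + 1) 1).map
            (fun i => PySem.List.pyGetD array i 0))
      else
        utLoop array fuel left (right + min 2 ((array.length : Int) - right)) true
          (result ++ (PySem.List.pyRange right (right + min 2 ((array.length : Int) - right)) 1).map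
            (fun i => PySem.List.pyGetD array i 0))
    else result

def unusual_traversal (array : List Int) : List Int :=
  let mid := PySem.Int.floordiv (array.length : Int) 2
  utLoop array (2 * array.length + 2) (mid - 1) (mid + 1) true [PySem.List.pyGetD array mid 0]

-- ===== PORT B =====
def unusual_traversal_alt (array : List Int) : List Int :=
  let mid := PySem.Int.floordiv (array.length : Int) 2
  let rev := (array.take mid.toNat).reverse
  let leftChunks := (PySem.List.pyRange 0 (rev.length : Int) 2).map
    (fun k => (PySem.List.slice rev (some k) (some (k + 2))).reverse)
  let rest := array.drop (mid.toNat + 1)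
  let rightChunks := (PySem.List.pyRange 0 (rest.length : Int) 2).map
    (fun k => PySem.List.slice rest (some k) (some (k + 2)))
  let out := (leftChunks.zip rightChunks).foldl
    (fun out p => out ++ p.1 ++ p.2) [PySem.List.pyGetD array mid 0]
  let k := min leftChunks.length rightChunks.length
  (leftChunks.drop k ++ rightChunks.drop k).foldl (fun out c => out ++ c) out

-- ===== PRECONDITION & SPEC =====
-- A raises IndexError (array[mid]) on the empty list; Pre_ excludes exactly that input.
def Pre_unusual_traversal (array : List Int) : Prop := array ≠ []
instance (array : List Int) : Decidable (Pre_unusual_traversal array) := by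
  unfold Pre_unusual_traversal; infer_instance
def pvWitness_unusual_traversal : List Int := [1, 2, 3, 4, 5]

def Spec_unusual_traversal (array : List Int) (out : List Int) : Prop := out = unusual_traversal_alt array
instance (array : List Int) (out : List Int) : Decidable (Spec_unusual_traversal array out) := by
  unfold Spec_unusual_traversal; infer_instance

-- ===== CLAIM =====
def Claim_equal_unusual_traversal : Prop := ∀ (array : List Int), Dom_unusual_traversal array →
  Pre_unusual_traversal array → Spec_unusual_traversal array (unusual_traversal array)

-- ===== LEMMAS AND PROOFS =====

-- recursive characterisation of B's ≤2-size chunking comprehension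
def pvChunks : List Int → List (List Int)
  | [] => []
  | [x] => [[x]]
  | [x, y] => [[x, y]]
  | x :: y :: z :: rest => [x, y] :: pvChunks (z :: rest)

-- recursive characterisation of B's interleaving folds
def bInterleave : List (List Int) → List (List Int) → List Int
  | [], rs => rs.flatten
  | l :: ls, [] => (l :: ls).flatten
  | l :: ls, r :: rs => l ++ r ++ bInterleave ls rs

-- B's chunk lists as functions of A's loop cursors
def pvLC (array : List Int) (l : Nat) : List (List Int) :=
  (pvChunks ((array.take l).reverse)).map List.reverse
def pvRC (array : List Int) (r : Nat) : List (List Int) := pvChunks (array.drop r)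

-- interleaving that starts on the right side
def pvInterR (ls rs : List (List Int)) : List Int :=
  match rs with
  | [] => ls.flatten
  | r :: rs => r ++ bInterleave ls rs

theorem pvChunks_nil : pvChunks [] = [] := rfl

theorem pvChunks_singleton (x : Int) : pvChunks [x] = [[x]] := rfl

theorem pvChunks_cons_cons (x y : Int) (rest : List Int) :
    pvChunks (x :: y :: rest) = [x, y] :: pvChunks rest := by
  rcases rest with _ | ⟨z, rest⟩ <;> rfl

theorem bInterleave_cons (c : List Int) (ls rs : List (List Int)) :
    bInterleave (c :: ls) rs = c ++ pvInterR ls rs := by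
  rcases rs with _ | ⟨r, rs⟩ <;> simp [bInterleave, pvInterR]

theorem bInterleave_nil_eq (rs : List (List Int)) : bInterleave [] rs = pvInterR [] rs := by
  rcases rs with _ | ⟨r, rs⟩
  · rfl
  · rcases rs with _ | ⟨r', rs⟩ <;> simp [bInterleave, pvInterR]

theorem pvInterR_nil (ls : List (List Int)) : pvInterR ls [] = bInterleave ls [] := by
  rcases ls with _ | ⟨l, ls⟩ <;> simp [bInterleave, pvInterR]

theorem pvLC_zero (array : List Int) : pvLC array 0 = [] := by
  simp [pvLC, pvChunks_nil]

theorem pvRC_len (array : List Int) (r : Nat) (h : array.length ≤ r) : pvRC array r = [] := by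
  simp [pvRC, List.drop_eq_nil_of_le h, pvChunks_nil]

theorem pvLC_step (array : List Int) (l : Nat) (h1 : 1 ≤ l) (h2 : l ≤ array.length) :
    pvLC array l = ((array.drop (l - 2)).take (min 2 l)) :: pvLC array (l - 2) := by
  unfold pvLC
  have key : List.take (l - 2) array ++ List.take (min 2 l) (List.drop (l - 2) array)
      = List.take l array := by
    rw [show min 2 l = l - (l - 2) from by omega, ← List.drop_take,
      show List.take (l - 2) array = (List.take l array).take (l - 2) from by
        rw [List.take_take]; congr 1; omega,
      List.take_append_drop]
  have hsplit : (array.take l).reverse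
      = ((array.drop (l - 2)).take (min 2 l)).reverse ++ (array.take (l - 2)).reverse := by
    rw [← List.reverse_append, key]
  rw [hsplit]
  rcases hl2 : min 2 l with _ | m
  · omega
  rcases m with _ | m
  · -- chunk has length 1, so l = 1 and the remainder is empty
    have hl1 : l = 1 := by omega
    subst hl1
    have hlen : ((array.drop 0).take 1).length = 1 := by simp; omega
    obtain ⟨x, hx⟩ := List.length_eq_one_iff.mp hlen
    rw [hx]
    simp [pvChunks_singleton, pvChunks_nil]
  · -- chunk has length 2
    have hm : m = 0 := by omega
    subst hm
    have hlen : ((array.drop (l - 2)).take (min 2 l)).length = 2 := by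
      simp; omega
    obtain ⟨x, y, hx⟩ := List.length_eq_two.mp hlen
    rw [hl2] at hx
    rw [hx]
    simp only [List.reverse_cons, List.reverse_nil, List.nil_append, List.cons_append]
    rw [pvChunks_cons_cons]
    simp

theorem pvRC_step (array : List Int) (r : Nat) (h : r < array.length) :
    pvRC array r
      = ((array.drop r).take (min 2 (array.length - r)))
        :: pvRC array (r + min 2 (array.length - r)) := by
  unfold pvRC
  have hlen : (array.drop r).length = array.length - r := by simp
  rcases hd : array.drop r with _ | ⟨x, rest⟩
  · exfalso; rw [hd] at hlen; simp at hlen; omega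
  rcases rest with _ | ⟨y, rest⟩
  · -- exactly one element left
    have h1 : array.length - r = 1 := by rw [hd] at hlen; simpa using hlen.symm
    have hmin : min 2 (array.length - r) = 1 := by omega
    rw [hmin, pvChunks_singleton]
    have : array.drop (r + 1) = [] := by
      apply List.drop_eq_nil_of_le; omega
    simp [this, pvChunks_nil]
  · -- at least two elements left
    have h2 : 2 ≤ array.length - r := by rw [hd] at hlen; simp at hlen; omega
    have hmin : min 2 (array.length - r) = 2 := by omega
    rw [hmin, pvChunks_cons_cons]
    have hrest : rest = array.drop (r + 2) := by
      have := congrArg (List.drop 2) hd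
      simpa [List.drop_drop] using this.symm
    simp [hrest]

-- a contiguous index scan over pyRange is a slice
theorem map_pyRange_slice (xs : List Int) (a b : Int) (h0 : 0 ≤ a) (hab : a ≤ b)
    (hb : b ≤ (xs.length : Int)) :
    (PySem.List.pyRange a b 1).map (fun i => PySem.List.pyGetD xs i 0)
      = (xs.drop a.toNat).take (b - a).toNat := by
  rw [PySem.List.pyRange_one, List.map_map]
  apply List.ext_getElem
  · simp; omega
  · intro i hi1 hi2
    simp only [List.getElem_map, List.getElem_range, Function.comp_apply,
      List.getElem_take, List.getElem_drop]
    simp only [List.length_map, List.length_range] at hi1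
    have hib : (i : Int) < b - a := by omega
    rw [show a + (i : Int) = ((a.toNat + i : Nat) : Int) by omega]
    rw [PySem.List.pyGetD_natCast]
    rw [List.getD_eq_getElem _ _ (by omega)]

theorem utLoop_eq (array : List Int) (μ : Nat) :
    ∀ (left right : Int) (takeLeft : Bool),
    2 * ((left + 1).toNat + ((array.length : Int) - right).toNat)
      + (if takeLeft then (if 0 ≤ left then 0 else 1)
         else (if right < (array.length : Int) then 0 else 1)) ≤ μ →
    -1 ≤ left → left < (array.length : Int) → 0 ≤ right → right ≤ (array.length : Int) →
    ∀ (acc : List Int),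
    utLoop array μ left right takeLeft acc =
      acc ++ (if takeLeft
        then bInterleave (pvLC array (left + 1).toNat) (pvRC array right.toNat)
        else pvInterR (pvLC array (left + 1).toNat) (pvRC array right.toNat)) := by
  induction μ using Nat.strong_induction_on with
  | _ μ ih =>
    intro left right takeLeft hμ h1 h2 h3 h4 acc
    have hfuel : 1 ≤ μ := by
      cases takeLeft <;> simp only [if_true, Bool.false_eq_true, if_false] at hμ <;>
        split_ifs at hμ <;> omega
    obtain ⟨f, rfl⟩ : ∃ f, μ = f + 1 := ⟨μ - 1, by omega⟩
    simp only [utLoop]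
    by_cases hc : 0 ≤ left ∨ right < (array.length : Int)
    · rw [if_pos hc]
      cases takeLeft with
      | true =>
        simp only [if_true] at hμ ⊢
        by_cases hl : 0 ≤ left
        · rw [if_pos hl] at hμ
          -- real left chunk
          have hchunk : (PySem.List.pyRange (left - min 2 (left + 1) + 1) (left + 1) 1).map
                (fun i => PySem.List.pyGetD array i 0)
              = (array.drop ((left + 1).toNat - 2)).take (min 2 (left + 1).toNat) := by
            rw [map_pyRange_slice array _ _ (by omega) (by omega) (by omega)]
            rw [show (left - min 2 (left + 1) + 1).toNat = (left + 1).toNat - 2 from by omega,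
              show (left + 1 - (left - min 2 (left + 1) + 1)).toNat
                = min 2 (left + 1).toNat from by omega]
          rw [hchunk]
          rw [ih f (by omega) (left - min 2 (left + 1)) right false
            (by split_ifs <;> omega) (by omega) (by omega) (by omega) (by omega)]
          simp only [Bool.false_eq_true, if_false]
          rw [pvLC_step array (left + 1).toNat (by omega) (by omega)]
          rw [show (left - min 2 (left + 1) + 1).toNat = (left + 1).toNat - 2 from by omega]
          rw [bInterleave_cons]
          simp [List.append_assoc]
        · rw [if_neg hl] at hμ
          -- left exhausted: empty chunk, flag flips
          have hleft : left = -1 := by omega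
          subst hleft
          replace hc : right < (array.length : Int) := hc.resolve_left (by omega)
          have hchunk : (PySem.List.pyRange (-1 - min 2 (-1 + 1) + 1) (-1 + 1) 1).map
                (fun i => PySem.List.pyGetD array i 0) = [] := by
            rw [map_pyRange_slice array _ _ (by omega) (by omega) (by omega)]
            simp
          rw [hchunk]
          have hb2 : 2 * ((((-1 : Int) - min 2 (-1 + 1)) + 1).toNat
              + ((array.length : Int) - right).toNat)
              + (if right < (array.length : Int) then 0 else 1) ≤ f := by
            rw [if_pos hc]; omega
          rw [ih f (by omega) (-1 - min 2 (-1 + 1)) right false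
            hb2 (by omega) (by omega) (by omega) (by omega)]
          simp only [Bool.false_eq_true, if_false]
          simp [pvLC_zero, bInterleave_nil_eq]
      | false =>
        simp only [Bool.false_eq_true, if_false] at hμ ⊢
        by_cases hr : right < (array.length : Int)
        · rw [if_pos hr] at hμ
          -- real right chunk
          have hchunk : (PySem.List.pyRange right (right + min 2 ((array.length : Int) - right)) 1).map
                (fun i => PySem.List.pyGetD array i 0)
              = (array.drop right.toNat).take (min 2 (array.length - right.toNat)) := by
            rw [map_pyRange_slice array _ _ (by omega) (by omega) (by omega)]
            rw [show (right + min 2 ((array.length : Int) - right) - right).toNat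
              = min 2 (array.length - right.toNat) from by omega]
          rw [hchunk]
          have hb3 : 2 * ((left + 1).toNat
              + ((array.length : Int) - (right + min 2 ((array.length : Int) - right))).toNat)
              + (if 0 ≤ left then 0 else 1) ≤ f := by
            split_ifs <;> omega
          rw [ih f (by omega) left (right + min 2 ((array.length : Int) - right)) true
            hb3 (by omega) (by omega) (by omega) (by omega)]
          simp only [if_true]
          rw [pvRC_step array right.toNat (by omega)]
          rw [show (right + min 2 ((array.length : Int) - right)).toNat
              = right.toNat + min 2 (array.length - right.toNat) from by omega]
          simp [pvInterR, List.append_assoc]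
        · rw [if_neg hr] at hμ
          replace hc : 0 ≤ left := hc.resolve_right hr
          -- right exhausted: empty chunk, flag flips
          have hchunk : (PySem.List.pyRange right (right + min 2 ((array.length : Int) - right)) 1).map
                (fun i => PySem.List.pyGetD array i 0) = [] := by
            rw [map_pyRange_slice array _ _ (by omega) (by omega) (by omega)]
            simp
            omega
          rw [hchunk]
          have hb4 : 2 * ((left + 1).toNat
              + ((array.length : Int) - (right + min 2 ((array.length : Int) - right))).toNat)
              + (if 0 ≤ left then 0 else 1) ≤ f := by
            rw [if_pos hc]; omega
          rw [ih f (by omega) left (right + min 2 ((array.length : Int) - right)) true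
            hb4 (by omega) (by omega) (by omega) (by omega)]
          simp only [if_true]
          have hre : (right + min 2 ((array.length : Int) - right)).toNat = right.toNat := by omega
          rw [hre, pvRC_len array right.toNat (by omega), pvInterR_nil]
          simp
    · -- loop exits
      rw [if_neg hc]
      rw [not_or] at hc
      obtain ⟨hcl, hcr⟩ := hc
      have hleft : left = -1 := by omega
      have hright : right = (array.length : Int) := by omega
      subst hleft
      rw [hright]
      have e1 : ((-1 : Int) + 1).toNat = 0 := rfl
      have e2 : ((array.length : Int)).toNat = array.length := by omega
      rw [e1, e2, pvLC_zero, pvRC_len array _ (le_refl _)]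
      cases takeLeft <;> simp [pvInterR, bInterleave]

-- the slice comprehension of B computes the recursive chunking
theorem pyChunks_eq (xs : List Int) :
    (PySem.List.pyRange 0 (xs.length : Int) 2).map
      (fun k => PySem.List.slice xs (some k) (some (k + 2))) = pvChunks xs := by
  induction xs using pvChunks.induct with
  | case1 => simp [PySem.List.pyRange_of_pos _ _ (by norm_num : (0:Int) < 2), pvChunks]
  | case2 x =>
    rw [PySem.List.pyRange_of_pos _ _ (by norm_num : (0:Int) < 2)]
    norm_num [pvChunks]
    rfl
  | case3 x y =>
    rw [PySem.List.pyRange_of_pos _ _ (by norm_num : (0:Int) < 2)]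
    norm_num [pvChunks]
    rfl
  | case4 x y z rest ih =>
    rw [PySem.List.pyRange_of_pos _ _ (by norm_num : (0:Int) < 2)] at ih ⊢
    rw [if_pos (show (0:Int) < ((x :: y :: z :: rest).length : Int) by push_cast [List.length_cons]; omega)]
    rw [if_pos (show (0:Int) < ((z :: rest).length : Int) by push_cast [List.length_cons]; omega)] at ih
    have hcount : ((((x :: y :: z :: rest).length : Int) - 0 + 2 - 1)/2).toNat
        = ((((z :: rest).length : Int) - 0 + 2 - 1)/2).toNat + 1 := by
      simp; omega
    rw [hcount, List.range_succ_eq_map]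
    simp only [List.map_cons, List.map_map]
    rw [show pvChunks (x :: y :: z :: rest) = [x, y] :: pvChunks (z :: rest) from rfl, ← ih]
    simp only [List.map_map]
    congr 1
    apply List.map_congr_left
    intro j hj
    show PySem.List.slice (x :: y :: z :: rest)
          (some (0 + 2 * ((j : Nat) + 1 : Nat))) (some (0 + 2 * ((j : Nat) + 1 : Nat) + 2))
        = PySem.List.slice (z :: rest) (some (0 + 2 * (j : Int))) (some (0 + 2 * (j : Int) + 2))
    rw [show ((0 : Int) + 2 * ((j : Nat) + 1 : Nat)) = ((2*j+2 : Nat) : Int) from by push_cast; ring,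
      show ((0 : Int) + 2 * (j : Int)) = ((2*j : Nat) : Int) from by push_cast; ring,
      show (((2*j+2 : Nat) : Int)) + 2 = ((2*j+2 : Nat) : Int) + ((2:Nat) : Int) from by norm_num,
      show (((2*j : Nat) : Int)) + 2 = ((2*j : Nat) : Int) + ((2:Nat) : Int) from by norm_num,
      PySem.List.slice_natCast_add, PySem.List.slice_natCast_add]
    have hd : List.drop (2*j+2) (x :: y :: z :: rest) = List.drop (2*j) (z :: rest) := by
      rw [show 2*j+2 = (2*j+1)+1 from by omega, List.drop_succ_cons, List.drop_succ_cons]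
    rw [hd]

theorem foldl_app (cs : List (List Int)) (out : List Int) :
    cs.foldl (fun o c => o ++ c) out = out ++ cs.flatten := by
  induction cs generalizing out with
  | nil => simp
  | cons c cs ih => simp [ih, List.append_assoc]

-- B's zip-then-flush folds compute the recursive interleaving
theorem interleave_fold (ls : List (List Int)) : ∀ (rs : List (List Int)) (out : List Int),
    (ls.drop (min ls.length rs.length) ++ rs.drop (min ls.length rs.length)).foldl
        (fun o c => o ++ c) ((ls.zip rs).foldl (fun o p => o ++ p.1 ++ p.2) out)
      = out ++ bInterleave ls rs := by
  induction ls with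
  | nil => intro rs out; simp [foldl_app, bInterleave]
  | cons l ls ih =>
    intro rs out
    rcases rs with _ | ⟨r, rs⟩
    · simp [foldl_app, bInterleave]
    · simp only [List.zip_cons_cons, List.length_cons, Nat.succ_min_succ,
        List.drop_succ_cons, List.foldl_cons]
      rw [ih rs (out ++ l ++ r)]
      simp [bInterleave, List.append_assoc]

-- ===== VERDICT =====
theorem unusual_traversal_spec : Claim_equal_unusual_traversal := by
  intro array _ hpre
  unfold Spec_unusual_traversal unusual_traversal unusual_traversal_alt
  have hn : 1 ≤ array.length := List.length_pos_of_ne_nil hpre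
  simp only []
  have hm : PySem.Int.floordiv (array.length : Int) 2 = (array.length : Int) / 2 :=
    PySem.Int.floordiv_eq_ediv_of_pos (by norm_num)
  set mid := PySem.Int.floordiv (array.length : Int) 2 with hmid
  have hmb : 0 ≤ mid ∧ mid < (array.length : Int) := by rw [hm]; omega
  rw [utLoop_eq array (2 * array.length + 2) (mid - 1) (mid + 1) true
    (by simp only [if_true]; split_ifs <;> omega)
    (by omega) (by omega) (by omega) (by omega)]
  simp only [if_true]
  rw [show (mid - 1 + 1).toNat = mid.toNat from by omega,
    show (mid + 1).toNat = mid.toNat + 1 from by omega]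
  rw [show (PySem.List.pyRange 0 (((array.take mid.toNat).reverse).length : Int) 2).map
        (fun k => (PySem.List.slice ((array.take mid.toNat).reverse) (some k) (some (k + 2))).reverse)
      = ((PySem.List.pyRange 0 (((array.take mid.toNat).reverse).length : Int) 2).map
        (fun k => PySem.List.slice ((array.take mid.toNat).reverse) (some k) (some (k + 2)))).map
          List.reverse from by rw [List.map_map]; rfl]
  rw [pyChunks_eq ((array.take mid.toNat).reverse), pyChunks_eq (array.drop (mid.toNat + 1))]
  rw [interleave_fold]
  simp [pvLC, pvRC]
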